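-- pv_equiv track=rewrite | github.com/victorgarmann/lab6 | string_sum.py | get_line_with_highest_stringsum
-- ===== SOURCE A (Python) =====
-- def get_stringsum(s):
--     sum = 0
--
--     splittet = s.split(" ")
--     for tall in splittet:
--         try:
--             sum += int(tall)
--         except:
--             continue
--
--     return sum
--
-- def get_line_with_highest_stringsum(s):
--     lines = s.splitlines()
--     i = 0
--     t = 0
--     r = None
--
--     for index, line in enumerate(lines):
--
--         string_sum = get_stringsum(line)
--         if string_sum > t:
--             r = line
--             t = string_sum
--             i = index + 1
--
--
--
--
--     return (i,t,r)
-- ===== SOURCE B (Python) =====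
-- def get_stringsum(s):
--     sum = 0
--
--     splittet = s.split(" ")
--     for tall in splittet:
--         try:
--             sum += int(tall)
--         except:
--             continue
--
--     return sum
--
-- def get_line_with_highest_stringsum(s):
--     scored = [(get_stringsum(line), idx + 1, line) for idx, line in enumerate(s.splitlines())]
--     positive = [x for x in scored if x[0] > 0]
--     if not positive:
--         return (0, 0, None)
--     best = max(positive, key=lambda x: x[0])  # max returns the first maximal element
--     return (best[1], best[0], best[2])
-- ===== Notes on version B (the rewrite author's own statement) =====
-- stated objective: idiomatic
-- what changed: Replaces A's running-max accumulator loop (mutable i/t/r updated in place) with a build-score-table, filter-positives, reduce-with-max pipeline; get_stringsum is unchanged.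
import Mathlib
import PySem

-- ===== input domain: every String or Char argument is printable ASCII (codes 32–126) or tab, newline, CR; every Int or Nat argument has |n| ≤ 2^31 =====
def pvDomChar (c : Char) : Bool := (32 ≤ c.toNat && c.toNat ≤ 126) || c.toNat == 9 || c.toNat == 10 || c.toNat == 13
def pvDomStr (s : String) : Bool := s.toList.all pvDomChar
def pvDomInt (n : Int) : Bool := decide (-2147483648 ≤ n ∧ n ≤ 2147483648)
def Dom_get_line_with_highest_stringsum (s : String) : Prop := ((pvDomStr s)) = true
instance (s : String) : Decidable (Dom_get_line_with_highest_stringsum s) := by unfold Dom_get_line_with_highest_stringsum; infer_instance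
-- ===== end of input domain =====

-- B replaces A's running-max accumulator loop with a build-score-table / filter / reduce-by-max pipeline (idiomatic; same behaviour, same cost).

-- ===== PORT A =====
-- shared helper of both Pythons: sum of the int-parsable single-space-separated tokens
def get_stringsum_port (s : String) : Int :=
  ((PySem.Str.split? s " ").getD []).foldl   -- s.split(" "): sep " " is nonempty, so split? is always `some`
    (fun sum tall =>
      match PySem.Int.ofStr? tall with   -- try: sum += int(tall) / except: continue
      | some v => sum + v
      | none => sum)
    0

def get_line_with_highest_stringsum (s : String) : Int × Int × Option String :=
  (PySem.List.enumerate (PySem.Str.splitlines s)).foldl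
    (fun (st : Int × Int × Option String) (p : Int × String) =>
      let string_sum := get_stringsum_port p.2
      if string_sum > st.2.1 then (p.1 + 1, string_sum, some p.2) else st)
    (0, 0, none)

-- ===== PORT B =====
-- max(positive, key=lambda x: x[0]) on a nonempty list, ported by hand: Python keeps the
-- FIRST maximal element, i.e. a left fold replacing the best only on a strictly greater key — exact.
def pyMaxKeyFst (h : Int × Int × String) (tl : List (Int × Int × String)) : Int × Int × String :=
  tl.foldl (fun b x => if x.1 > b.1 then x else b) h

def get_line_with_highest_stringsum_alt (s : String) : Int × Int × Option String :=
  match ((PySem.List.enumerate (PySem.Str.splitlines s)).map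
      (fun p => (get_stringsum_port p.2, p.1 + 1, p.2))).filter    -- positive = scored filtered by sum > 0
      (fun x => decide (x.1 > 0)) with
  | [] => (0, 0, none)
  | h :: tl =>
    let best := pyMaxKeyFst h tl
    (best.2.1, best.1, some best.2.2)

-- ===== PRECONDITION & SPEC =====
def Spec_get_line_with_highest_stringsum (s : String) (out : Int × Int × Option String) : Prop := out = get_line_with_highest_stringsum_alt s
instance (s : String) (out : Int × Int × Option String) : Decidable (Spec_get_line_with_highest_stringsum s out) := by unfold Spec_get_line_with_highest_stringsum; infer_instance

-- ===== CLAIM (what is proved, stated in full; the proofs are below) =====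
def Claim_equal_get_line_with_highest_stringsum : Prop := ∀ (s : String), Dom_get_line_with_highest_stringsum s → Spec_get_line_with_highest_stringsum s (get_line_with_highest_stringsum s)

-- ===== LEMMAS AND PROOFS =====

-- A's loop step, acting on an already-scored entry (sum, idx, line)
def pvStepA (st : Int × Int × Option String) (x : Int × Int × String) : Int × Int × Option String :=
  if x.1 > st.2.1 then (x.2.1, x.1, some x.2.2) else st

-- embed a B-best into an A-state
def pvConv (x : Int × Int × String) : Int × Int × Option String := (x.2.1, x.1, some x.2.2)

-- while the running best sum is ≥ 0, non-positive entries never update A's state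
theorem pvFoldA_filter (l : List (Int × Int × String)) (st : Int × Int × Option String)
    (h : 0 ≤ st.2.1) :
    l.foldl pvStepA st = (l.filter (fun x => decide (x.1 > 0))).foldl pvStepA st := by
  induction l generalizing st with
  | nil => rfl
  | cons x tl ih =>
    by_cases hx : x.1 > 0
    · simp only [List.filter_cons, hx, decide_true, List.foldl_cons]
      apply ih
      unfold pvStepA
      split_ifs with h2
      · show (0:Int) ≤ x.1; omega
      · exact h
    · have hstep : pvStepA st x = st := by
        unfold pvStepA
        have : ¬ x.1 > st.2.1 := by omega
        simp [this]
      simp only [List.filter_cons, hx, decide_false, List.foldl_cons, hstep]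
      exact ih st h

-- A's fold starting from a best entry agrees with B's reduce
theorem pvFoldA_conv (l : List (Int × Int × String)) (b : Int × Int × String) :
    l.foldl pvStepA (pvConv b) = pvConv (pyMaxKeyFst b l) := by
  induction l generalizing b with
  | nil => rfl
  | cons x tl ih =>
    simp only [List.foldl_cons, pyMaxKeyFst]
    have : pvStepA (pvConv b) x = pvConv (if x.1 > b.1 then x else b) := by
      unfold pvStepA pvConv
      split_ifs <;> rfl
    rw [this, ih]
    rfl

-- ===== VERDICT (by name: the statement is the Claim_ definition above) =====
theorem get_line_with_highest_stringsum_spec : Claim_equal_get_line_with_highest_stringsum := by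
  intro s _
  unfold Spec_get_line_with_highest_stringsum get_line_with_highest_stringsum get_line_with_highest_stringsum_alt
  set L := PySem.List.enumerate (PySem.Str.splitlines s) with hL
  have hA : L.foldl
      (fun (st : Int × Int × Option String) (p : Int × String) =>
        let string_sum := get_stringsum_port p.2
        if string_sum > st.2.1 then (p.1 + 1, string_sum, some p.2) else st)
      (0, 0, none)
      = (L.map (fun p => (get_stringsum_port p.2, p.1 + 1, p.2))).foldl pvStepA (0, 0, none) := by
    rw [List.foldl_map]; rfl
  rw [hA]
  set M := L.map (fun p => (get_stringsum_port p.2, p.1 + 1, p.2)) with hM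
  rw [pvFoldA_filter M (0, 0, none) (by norm_num)]
  cases hP : M.filter (fun x => decide (x.1 > 0)) with
  | nil => rfl
  | cons h tl =>
    have hpos : h.1 > 0 := by
      have hm : h ∈ M.filter (fun x => decide (x.1 > 0)) := by rw [hP]; exact List.mem_cons_self
      have := List.of_mem_filter hm
      simpa using this
    simp only [List.foldl_cons]
    have hfirst : pvStepA (0, 0, none) h = pvConv h := by
      unfold pvStepA pvConv
      simp [hpos]
    rw [hfirst, pvFoldA_conv]
    rfl
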